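-- pv_equiv track=rewrite | github.com/hoangle2112/model_navigator | tests/utils/triton_model_config.py | equal_model_configs_sets
-- ===== SOURCE A (Python) =====
-- from typing import Dict, List
--
-- def equal_model_configs_sets(a: List[Dict], b: List[Dict]):
--     a = a.copy()
--     b = b.copy()
--
--     same = None
--     for item in a:
--         if item not in b:
--             same = False
--             break
--         b.remove(item)
--     if same is None:
--         same = not b
--     else:
--         same = False
--     return same
-- ===== SOURCE B (Python) =====
-- from typing import Dict, List
--
-- def equal_model_configs_sets(a: List[Dict], b: List[Dict]):
--     return len(a) == len(b) and all(a.count(x) == b.count(x) for x in a)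
-- ===== Notes on version B (the rewrite author's own statement) =====
-- stated objective: simpler
-- what changed: B checks multiset equality by comparing lengths and per-element occurrence counts (list.count) instead of A's destructive greedy removal from a shrinking copy of b; nothing is copied or mutated.
import Mathlib
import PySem

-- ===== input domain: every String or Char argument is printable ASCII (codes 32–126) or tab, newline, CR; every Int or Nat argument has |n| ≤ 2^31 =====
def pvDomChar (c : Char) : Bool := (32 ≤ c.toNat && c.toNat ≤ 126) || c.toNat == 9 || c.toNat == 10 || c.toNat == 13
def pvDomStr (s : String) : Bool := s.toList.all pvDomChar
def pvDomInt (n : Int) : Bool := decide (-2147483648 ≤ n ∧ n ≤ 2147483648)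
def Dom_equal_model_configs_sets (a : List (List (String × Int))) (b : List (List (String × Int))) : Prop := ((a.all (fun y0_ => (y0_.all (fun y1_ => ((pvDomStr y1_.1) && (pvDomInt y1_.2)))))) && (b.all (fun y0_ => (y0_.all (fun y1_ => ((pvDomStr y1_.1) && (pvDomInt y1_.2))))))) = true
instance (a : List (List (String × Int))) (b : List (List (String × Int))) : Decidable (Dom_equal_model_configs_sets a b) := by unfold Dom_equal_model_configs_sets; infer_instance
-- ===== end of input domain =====

-- B replaces A's greedy remove-from-a-shrinking-copy with a length check plus per-element
-- occurrence counts (same cost, no copying/mutation); objective: simpler.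

-- ===== PORT A =====
-- Python dict '==' on dicts given as insertion-ordered association lists (a dict element of
-- a/b): equal lengths and every key of the left dict mapped to the same value by the right —
-- exact for Python's dict equality, which ignores insertion order. Used by both ports,
-- exactly where their Python uses '==' on the list elements.
def pyDictBeq (x y : List (String × Int)) : Bool :=
  (PySem.Dict.ofList x).size == (PySem.Dict.ofList y).size &&
    (PySem.Dict.ofList x).items.all (fun p => (PySem.Dict.ofList y).get? p.1 == some p.2)

-- b.remove(item): drop the first element equal (dict ==) to item; exact hand port
-- (CPython compares list element == item), only reached when a match exists.
def pyRemoveFirst (x : List (String × Int)) : List (List (String × Int)) → List (List (String × Int))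
  | [] => []
  | y :: ys => if pyDictBeq y x then ys else y :: pyRemoveFirst x ys

-- A's for-loop with its break: state is the remaining items of a and the shrinking copy of b;
-- falling off the end returns 'not b', the break returns False.
def eqLoopA (xs b : List (List (String × Int))) : Bool :=
  match xs with
  | [] => b.isEmpty
  | x :: rest => if b.any (fun y => pyDictBeq y x) then eqLoopA rest (pyRemoveFirst x b) else false

def equal_model_configs_sets (a : List (List (String × Int))) (b : List (List (String × Int))) : Bool :=
  eqLoopA a b

-- ===== PORT B =====
-- l.count(x): number of elements of l equal (dict ==) to x.
def pyCount (x : List (String × Int)) (l : List (List (String × Int))) : Nat :=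
  List.countP (fun y => pyDictBeq y x) l

def equal_model_configs_sets_alt (a : List (List (String × Int))) (b : List (List (String × Int))) : Bool :=
  (PySem.List.len a == PySem.List.len b) && a.all (fun x => pyCount x a == pyCount x b)

-- ===== PRECONDITION & SPEC =====
def Spec_equal_model_configs_sets (a : List (List (String × Int))) (b : List (List (String × Int))) (out : Bool) : Prop := out = equal_model_configs_sets_alt a b
instance (a : List (List (String × Int))) (b : List (List (String × Int))) (out : Bool) : Decidable (Spec_equal_model_configs_sets a b out) := by unfold Spec_equal_model_configs_sets; infer_instance

-- ===== CLAIM (what is proved, stated in full; the proofs are below) =====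
def Claim_equal_equal_model_configs_sets : Prop := ∀ (a : List (List (String × Int))) (b : List (List (String × Int))), Dom_equal_model_configs_sets a b → Spec_equal_model_configs_sets a b (equal_model_configs_sets a b)

-- ===== LEMMAS AND PROOFS =====

-- pyDictBeq tests equality of the two lookup functions.
lemma pyDictBeq_iff_get? (x y : List (String × Int)) :
    pyDictBeq x y = true ↔
      ∀ k, (PySem.Dict.ofList x).get? k = (PySem.Dict.ofList y).get? k := by
  have hndx := PySem.Dict.nodup_keys_ofList x
  have hndy := PySem.Dict.nodup_keys_ofList y
  have hlx : (PySem.Dict.ofList x).keys.length = (PySem.Dict.ofList x).items.length :=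
    List.length_map _
  have hly : (PySem.Dict.ofList y).keys.length = (PySem.Dict.ofList y).items.length :=
    List.length_map _
  simp only [pyDictBeq, Bool.and_eq_true, beq_iff_eq, List.all_eq_true, PySem.Dict.size]
  constructor
  · rintro ⟨hsize, hitems⟩ k
    cases hx : (PySem.Dict.ofList x).get? k with
    | some v =>
        have hm := PySem.Dict.mem_items_of_get?_eq_some _ hx
        have hv := hitems _ hm
        exact hv.symm
    | none =>
        rw [PySem.Dict.get?_eq_none_iff_not_mem_keys] at hx
        have hsub : (PySem.Dict.ofList x).keys ⊆ (PySem.Dict.ofList y).keys := by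
          intro k' hk'
          rcases List.mem_map.mp hk' with ⟨p, hp, hpk⟩
          have hv := hitems _ hp
          have hne : (PySem.Dict.ofList y).get? p.1 ≠ none := by simp [hv]
          have : p.1 ∈ (PySem.Dict.ofList y).keys := by
            by_contra hc
            exact hne ((PySem.Dict.get?_eq_none_iff_not_mem_keys _ _).mpr hc)
          rwa [hpk] at this
        have hperm : (PySem.Dict.ofList x).keys.Perm (PySem.Dict.ofList y).keys :=
          (List.subperm_of_subset hndx hsub).perm_of_length_le (by omega)
        have hky : k ∉ (PySem.Dict.ofList y).keys := fun hc => hx (hperm.mem_iff.mpr hc)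
        rw [(PySem.Dict.get?_eq_none_iff_not_mem_keys _ _).mpr hky]
  · intro h
    refine ⟨?_, ?_⟩
    · have hiff : ∀ k, k ∈ (PySem.Dict.ofList x).keys ↔ k ∈ (PySem.Dict.ofList y).keys := by
        intro k
        have hx := PySem.Dict.get?_eq_none_iff_not_mem_keys (PySem.Dict.ofList x) k
        have hy := PySem.Dict.get?_eq_none_iff_not_mem_keys (PySem.Dict.ofList y) k
        rw [h k] at hx
        constructor <;> intro hk <;> by_contra hc
        · exact (hx.mp (hy.mpr hc)) hk
        · exact (hy.mp (hx.mpr hc)) hk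
      have hperm : (PySem.Dict.ofList x).keys.Perm (PySem.Dict.ofList y).keys :=
        (List.perm_ext_iff_of_nodup hndx hndy).mpr hiff
      have := hperm.length_eq
      omega
    · intro p hp
      have := PySem.Dict.get?_of_mem_items _ hp hndx
      simp [← h p.1, this]

lemma pyDictBeq_refl (x : List (String × Int)) : pyDictBeq x x = true :=
  (pyDictBeq_iff_get? x x).mpr (fun _ => rfl)

-- removing a dict equal to x does not change what any other element compares equal to
lemma pyDictBeq_congr {y x : List (String × Int)} (h : pyDictBeq y x = true)
    (z : List (String × Int)) : pyDictBeq y z = pyDictBeq x z := by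
  rw [Bool.eq_iff_iff, pyDictBeq_iff_get?, pyDictBeq_iff_get?]
  rw [pyDictBeq_iff_get?] at h
  exact ⟨fun h2 k => (h k).symm.trans (h2 k), fun h2 k => (h k).trans (h2 k)⟩

lemma pyRemoveFirst_length {x : List (String × Int)} {b : List (List (String × Int))}
    (h : ∃ y ∈ b, pyDictBeq y x = true) : (pyRemoveFirst x b).length + 1 = b.length := by
  induction b with
  | nil => simp at h
  | cons y ys ih =>
    by_cases hy : pyDictBeq y x = true
    · simp [pyRemoveFirst, hy]
    · rcases h with ⟨y', hy', hbe⟩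
      rcases List.mem_cons.mp hy' with rfl | hmem
      · exact absurd hbe hy
      · simp only [pyRemoveFirst, hy, Bool.false_eq_true, ite_false, List.length_cons]
        rw [ih ⟨y', hmem, hbe⟩]

lemma pyCount_removeFirst {x : List (String × Int)} {b : List (List (String × Int))}
    (h : ∃ y ∈ b, pyDictBeq y x = true) (z : List (String × Int)) :
    pyCount z b = pyCount z (pyRemoveFirst x b) + (if pyDictBeq x z = true then 1 else 0) := by
  induction b with
  | nil => simp at h
  | cons y ys ih =>
    by_cases hy : pyDictBeq y x = true
    · simp only [pyRemoveFirst, hy, ite_true, pyCount, List.countP_cons]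
      rw [pyDictBeq_congr hy z]
    · rcases h with ⟨y', hy', hbe⟩
      rcases List.mem_cons.mp hy' with rfl | hmem
      · exact absurd hbe hy
      · simp only [pyRemoveFirst, hy, Bool.false_eq_true, ite_false, pyCount, List.countP_cons]
        have := ih ⟨y', hmem, hbe⟩
        simp only [pyCount] at this
        omega

-- A's greedy loop implies the per-class counts of B (for every probe z, not only z ∈ xs)
lemma eqLoopA_counts {xs : List (List (String × Int))} :
    ∀ {b : List (List (String × Int))}, eqLoopA xs b = true →
      xs.length = b.length ∧ ∀ z, pyCount z xs = pyCount z b := by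
  induction xs with
  | nil =>
    intro b h
    simp only [eqLoopA, List.isEmpty_iff] at h
    subst h
    simp [pyCount]
  | cons x rest ih =>
    intro b h
    simp only [eqLoopA] at h
    by_cases hm : b.any (fun y => pyDictBeq y x) = true
    · rw [if_pos hm] at h
      rcases List.any_eq_true.mp hm with ⟨y, hyb, hbe⟩
      have hex : ∃ y ∈ b, pyDictBeq y x = true := ⟨y, hyb, hbe⟩
      obtain ⟨hl, hc⟩ := ih h
      have hlen := pyRemoveFirst_length hex
      refine ⟨by simp only [List.length_cons]; omega, ?_⟩
      intro z
      have h2 := pyCount_removeFirst hex z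
      have h3 := hc z
      simp only [pyCount, List.countP_cons] at *
      omega
    · rw [if_neg hm] at h
      exact absurd h (by simp)

lemma counts_eqLoopA {xs : List (List (String × Int))} :
    ∀ {b : List (List (String × Int))}, xs.length = b.length →
      (∀ z ∈ xs, pyCount z xs = pyCount z b) → eqLoopA xs b = true := by
  induction xs with
  | nil =>
    intro b hl _
    cases b with
    | nil => rfl
    | cons _ _ => simp at hl
  | cons x rest ih =>
    intro b hl hc
    have hxpos : 0 < pyCount x b := by
      have h1 := hc x List.mem_cons_self
      have h2 : 0 < pyCount x (x :: rest) := by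
        simp [pyCount, pyDictBeq_refl]
      omega
    have hex : ∃ y ∈ b, pyDictBeq y x = true := List.countP_pos_iff.mp hxpos
    have hany : b.any (fun y => pyDictBeq y x) = true := List.any_eq_true.mpr hex
    simp only [eqLoopA]
    rw [if_pos hany]
    have hlen := pyRemoveFirst_length hex
    apply ih
    · simp only [List.length_cons] at hl; omega
    · intro z hz
      have h1 := hc z (List.mem_cons_of_mem _ hz)
      have h2 := pyCount_removeFirst hex z
      simp only [pyCount, List.countP_cons] at h1 h2 ⊢
      omega

-- ===== VERDICT (by name: the statement is the Claim_ definition above) =====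
theorem equal_model_configs_sets_spec : Claim_equal_equal_model_configs_sets := by
  intro a b _
  unfold Spec_equal_model_configs_sets equal_model_configs_sets
  rw [Bool.eq_iff_iff]
  constructor
  · intro h
    obtain ⟨hl, hcnt⟩ := eqLoopA_counts h
    simp only [equal_model_configs_sets_alt, Bool.and_eq_true, beq_iff_eq, List.all_eq_true,
      PySem.List.len_eq]
    exact ⟨by exact_mod_cast hl, fun x _ => by rw [hcnt x]⟩
  · intro h
    simp only [equal_model_configs_sets_alt, Bool.and_eq_true, beq_iff_eq, List.all_eq_true,
      PySem.List.len_eq] at h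
    exact counts_eqLoopA (by exact_mod_cast h.1) (fun z hz => h.2 z hz)
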